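-- pv_equiv track=rewrite | github.com/thierrypdamiba/maxq | maxq/server/routers/index.py | find_text_field
-- ===== SOURCE A (Python) =====
-- from typing import Optional, List, Literal
--
-- def find_text_field(sample: dict) -> Optional[str]:
--     """Auto-detect the best text field from a sample."""
--     candidates = ["text", "content", "prompt", "question", "description", "body", "message"]
--
--     # First try known names
--     for name in candidates:
--         if name in sample and isinstance(sample[name], str) and len(sample[name]) > 20:
--             return name
--
--     # Then find any string field > 20 chars
--     for key, value in sample.items():
--         if isinstance(value, str) and len(value) > 20:
--             return key
--
--     return None
-- ===== SOURCE B (Python) =====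
-- def find_text_field(sample: dict):
--     """Auto-detect the best text field from a sample."""
--     candidates = ["text", "content", "prompt", "question", "description", "body", "message"]
--     rank = {name: i for i, name in enumerate(candidates)}
--     n = len(candidates)
--     # single pass: keep the qualifying key of lowest priority rank
--     # (candidate names rank 0..6; other keys rank n+position, increasing)
--     best = None
--     for i, (k, v) in enumerate(sample.items()):
--         if isinstance(v, str) and len(v) > 20:
--             r = rank.get(k, n + i)
--             if best is None or r < best[0]:
--                 best = (r, k)
--     return best[1] if best is not None else None
-- ===== Notes on version B (the rewrite author's own statement) =====
-- stated objective: alternative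
-- what changed: A's two staged scans (known names first, then dict items) are replaced by a single pass over the dict items that keeps the qualifying key of lowest priority rank (candidate names rank 0..6 via a precomputed rank dict, other keys rank 7+position), returning the kept key.
import Mathlib
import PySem

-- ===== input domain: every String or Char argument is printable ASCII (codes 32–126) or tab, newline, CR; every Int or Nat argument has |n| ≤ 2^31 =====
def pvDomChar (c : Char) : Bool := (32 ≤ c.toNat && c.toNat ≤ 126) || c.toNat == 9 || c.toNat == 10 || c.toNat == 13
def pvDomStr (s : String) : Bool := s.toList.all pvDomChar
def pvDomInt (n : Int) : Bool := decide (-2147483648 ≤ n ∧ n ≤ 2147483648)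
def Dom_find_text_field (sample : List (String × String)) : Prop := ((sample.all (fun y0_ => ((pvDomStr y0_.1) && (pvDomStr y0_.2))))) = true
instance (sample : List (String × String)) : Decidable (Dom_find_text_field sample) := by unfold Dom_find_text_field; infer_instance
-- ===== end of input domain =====

-- B replaces A's two staged scans by a single pass over the dict that keeps the
-- qualifying key of lowest priority rank (objective: alternative algorithm, same cost).

-- ===== PORT A =====
-- the fixed candidate names of A
def pvCandidates : List String :=
  ["text", "content", "prompt", "question", "description", "body", "message"]

-- A's first loop: for name in candidates: if name in sample and len(sample[name]) > 20: return name
-- (dict lookup on the association list = first match; all values are str, so isinstance is True)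
def pvFindCand (names : List String) (sample : List (String × String)) : Option String :=
  match names with
  | [] => none
  | n :: rest =>
    match sample.lookup n with
    | some v => if 20 < PySem.Str.len v then some n else pvFindCand rest sample
    | none => pvFindCand rest sample

-- A's second loop: for key, value in sample.items(): if len(value) > 20: return key
def pvScanItems (items : List (String × String)) : Option String :=
  match items with
  | [] => none
  | (k, v) :: rest => if 20 < PySem.Str.len v then some k else pvScanItems rest

def find_text_field (sample : List (String × String)) : Option String :=
  match pvFindCand pvCandidates sample with
  | some n => some n
  | none => pvScanItems sample

-- ===== PORT B =====
-- Source B's candidates list and its rank dict {name: i for i, name in enumerate(candidates)}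
def pvCandList : List String :=
  ["text", "content", "prompt", "question", "description", "body", "message"]

def pvRankDict : List (String × Nat) := pvCandList.zipIdx

-- r = rank.get(k, n + i)  with n = len(candidates)
def pvRankOf (k : String) (i : Nat) : Nat :=
  (pvRankDict.lookup k).getD (pvCandList.length + i)

-- loop body: if the value qualifies, keep the (rank, key) of lowest rank seen so far
def pvStep (best : Option (Nat × String)) (x : (String × String) × Nat) : Option (Nat × String) :=
  if 20 < PySem.Str.len x.1.2 then
    let r := pvRankOf x.1.1 x.2
    match best with
    | none => some (r, x.1.1)
    | some b => if r < b.1 then some (r, x.1.1) else some b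
  else best

def find_text_field_alt (sample : List (String × String)) : Option String :=
  ((sample.zipIdx.foldl pvStep none)).map Prod.snd

-- ===== PRECONDITION & SPEC =====
-- Pre_ excludes association lists with duplicate keys: those do not represent any Python dict
-- (a Python dict has unique keys), so A's behaviour on them is not defined by the source.
def Pre_find_text_field (sample : List (String × String)) : Prop :=
  (sample.map Prod.fst).Nodup
instance (sample : List (String × String)) : Decidable (Pre_find_text_field sample) := by
  unfold Pre_find_text_field; infer_instance

def pvWitness_find_text_field : (List (String × String)) :=
  [("id", "42"), ("text", "a reasonably long sample sentence")]

def Spec_find_text_field (sample : List (String × String)) (out : Option String) : Prop := out = find_text_field_alt sample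
instance (sample : List (String × String)) (out : Option String) : Decidable (Spec_find_text_field sample out) := by unfold Spec_find_text_field; infer_instance

-- ===== CLAIM (what is proved, stated in full; the proofs are below) =====
def Claim_equal_find_text_field : Prop := ∀ (sample : List (String × String)), Dom_find_text_field sample → Pre_find_text_field sample → Spec_find_text_field sample (find_text_field sample)

-- ===== LEMMAS AND PROOFS =====

-- the Boolean A's loops test through the dict: key present with a string value longer than 20
def pvGood (sample : List (String × String)) (k : String) : Bool :=
  match sample.lookup k with
  | some v => 20 < PySem.Str.len v
  | none => false

-- the qualifying (rank, key) pairs of an enumerated item list, in order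
def pvQuals (l : List ((String × String) × Nat)) : List (Nat × String) :=
  l.filterMap (fun x => if 20 < PySem.Str.len x.1.2 then some (pvRankOf x.1.1 x.2, x.1.1) else none)

-- the accumulator update on qualifying pairs only
def pvMin (best : Option (Nat × String)) (y : Nat × String) : Option (Nat × String) :=
  match best with
  | none => some y
  | some b => if y.1 < b.1 then some y else some b

-- characterisation of pvGood
theorem pvGood_iff (sample : List (String × String)) (k : String) :
    pvGood sample k = true ↔ ∃ v, sample.lookup k = some v ∧ 20 < PySem.Str.len v := by
  unfold pvGood
  cases sample.lookup k <;> simp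

-- cons equations used to drive the inductions
theorem pvQuals_cons (x : (String × String) × Nat) (t : List ((String × String) × Nat)) :
    pvQuals (x :: t) =
      if 20 < PySem.Str.len x.1.2 then (pvRankOf x.1.1 x.2, x.1.1) :: pvQuals t
      else pvQuals t := by
  unfold pvQuals
  rw [List.filterMap_cons]
  split_ifs <;> rfl

theorem pvStep_eq (best : Option (Nat × String)) (x : (String × String) × Nat) :
    pvStep best x =
      if 20 < PySem.Str.len x.1.2 then pvMin best (pvRankOf x.1.1 x.2, x.1.1)
      else best := by
  cases best <;> unfold pvStep pvMin <;> split_ifs <;> rfl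

-- assoc-list helpers
theorem pv_lookup_mem {β : Type} {k : String} {v : β} {l : List (String × β)}
    (h : l.lookup k = some v) : (k, v) ∈ l := by
  induction l with
  | nil => simp [List.lookup] at h
  | cons p t ih =>
    obtain ⟨a, b⟩ := p
    by_cases hk : k = a
    · subst hk; simp [List.lookup] at h; simp [h]
    · have hke : (k == a) = false := by simp [hk]
      simp [List.lookup, hke] at h
      exact List.mem_cons_of_mem _ (ih h)

theorem pv_mem_lookup {k : String} {v : String} {l : List (String × String)}
    (hm : (k, v) ∈ l) (hnd : (l.map Prod.fst).Nodup) : l.lookup k = some v := by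
  induction l with
  | nil => simp at hm
  | cons p t ih =>
    obtain ⟨a, b⟩ := p
    simp only [List.map_cons, List.nodup_cons] at hnd
    rcases List.mem_cons.mp hm with h | h
    · injection h with h1 h2
      subst h1; subst h2
      simp [List.lookup]
    · have hk : k ≠ a := by
        rintro rfl
        exact hnd.1 (List.mem_map.mpr ⟨(k, v), h, rfl⟩)
      have hke : (k == a) = false := by simp [hk]
      simp [List.lookup, hke]
      exact ih h hnd.2

theorem pv_lookup_isSome {β : Type} {k : String} {l : List (String × β)}
    (h : k ∈ l.map Prod.fst) : ∃ v, l.lookup k = some v := by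
  induction l with
  | nil => simp at h
  | cons p t ih =>
    obtain ⟨a, b⟩ := p
    by_cases hk : k = a
    · subst hk; exact ⟨b, by simp [List.lookup]⟩
    · have hke : (k == a) = false := by simp [hk]
      simp only [List.map_cons, List.mem_cons] at h
      rcases h with rfl | h
      · exact absurd rfl hk
      · obtain ⟨v, hv⟩ := ih h
        exact ⟨v, by simp [List.lookup, hke, hv]⟩

theorem pv_mem_zipIdx_of_mem {α : Type} {x : α} {l : List α} (hm : x ∈ l) :
    ∀ n, ∃ i, (x, i) ∈ l.zipIdx n := by
  induction l with
  | nil => simp at hm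
  | cons a t ih =>
    intro n
    rcases List.mem_cons.mp hm with rfl | h
    · exact ⟨n, by simp [List.zipIdx_cons]⟩
    · obtain ⟨i, hi⟩ := ih h (n + 1)
      exact ⟨i, by simp [List.zipIdx_cons, hi]⟩

theorem pv_mem_of_mem_zipIdx {α : Type} {x : α} {i n : Nat} {l : List α}
    (h : (x, i) ∈ l.zipIdx n) : x ∈ l := by
  induction l generalizing n with
  | nil => simp [List.zipIdx] at h
  | cons a t ih =>
    rw [List.zipIdx_cons] at h
    rcases List.mem_cons.mp h with h | h
    · injection h with h1 h2
      simp [h1]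
    · exact List.mem_cons_of_mem _ (ih h)

-- B's fold equals the min-fold over the qualifying pairs
theorem pv_foldl_step_eq (l : List ((String × String) × Nat)) :
    ∀ acc, l.foldl pvStep acc = (pvQuals l).foldl pvMin acc := by
  induction l with
  | nil => intro acc; rfl
  | cons x t ih =>
    intro acc
    rw [List.foldl_cons, pvStep_eq, pvQuals_cons]
    by_cases hg : 20 < PySem.Str.len x.1.2
    · rw [if_pos hg, if_pos hg, List.foldl_cons, ih]
    · rw [if_neg hg, if_neg hg, ih]

-- a min-fold started at a value nothing beats returns that value
theorem pv_min_fixed (l : List (Nat × String)) (b : Nat × String)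
    (h : ∀ y ∈ l, ¬ y.1 < b.1) : l.foldl pvMin (some b) = some b := by
  induction l with
  | nil => rfl
  | cons a t ih =>
    have ha := h a (by simp)
    simp only [List.foldl, pvMin, if_neg ha]
    exact ih fun y hy => h y (by simp [hy])

-- the min-fold returns the unique minimal element
theorem pv_min_result (l : List (Nat × String)) (x : Nat × String)
    (hx : x ∈ l) (hmin : ∀ y ∈ l, x.1 < y.1 ∨ y = x) :
    ∀ acc, (acc = none ∨ ∃ b, acc = some b ∧ x.1 < b.1) →
      l.foldl pvMin acc = some x := by
  induction l with
  | nil => simp at hx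
  | cons a t ih =>
    intro acc hacc
    by_cases hax : a = x
    · subst hax
      have hstep : pvMin acc a = some a := by
        rcases hacc with rfl | ⟨b, rfl, hb⟩
        · rfl
        · simp [pvMin, hb]
      simp only [List.foldl, hstep]
      exact pv_min_fixed t a fun y hy => by
        rcases hmin y (by simp [hy]) with h | rfl
        · omega
        · omega
    · have hxt : x ∈ t := by
        rcases List.mem_cons.mp hx with rfl | h
        · exact absurd rfl hax
        · exact h
      have hlt : x.1 < a.1 := by
        rcases hmin a (by simp) with h | rfl
        · exact h
        · exact absurd rfl hax
      have hstep : pvMin acc a = none ∨ ∃ b, pvMin acc a = some b ∧ x.1 < b.1 := by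
        rcases hacc with rfl | ⟨b, rfl, hb⟩
        · exact Or.inr ⟨a, rfl, hlt⟩
        · by_cases h : a.1 < b.1
          · exact Or.inr ⟨a, by simp [pvMin, h], hlt⟩
          · exact Or.inr ⟨b, by simp [pvMin, h], hb⟩
      simp only [List.foldl]
      exact ih hxt (fun y hy => hmin y (by simp [hy])) _ hstep

-- a min-fold over a rank-increasing list returns its head
theorem pv_min_head (l : List (Nat × String))
    (h : l.Pairwise (fun a b => a.1 < b.1)) : l.foldl pvMin none = l.head? := by
  cases l with
  | nil => rfl
  | cons a t =>
    simp only [List.foldl, pvMin, List.head?]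
    exact pv_min_fixed t a fun y hy => by
      have := (List.pairwise_cons.mp h).1 y hy; omega

-- A's first loop is find? of pvGood over the candidate names
theorem pvFindCand_eq (names : List String) (sample : List (String × String)) :
    pvFindCand names sample = names.find? (pvGood sample) := by
  induction names with
  | nil => rfl
  | cons n rest ih =>
    simp only [pvFindCand, List.find?, pvGood]
    cases h : sample.lookup n with
    | none => simpa [h] using ih
    | some v =>
      by_cases hl : 20 < v.length <;>
        simp [PySem.Str.len, hl, ih]

-- A's second loop is the head key of the qualifying pairs, for any enumeration start
theorem pvScanItems_eq_head (l : List (String × String)) :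
    ∀ n, pvScanItems l = ((pvQuals (l.zipIdx n)).head?).map Prod.snd := by
  induction l with
  | nil => intro n; rfl
  | cons p t ih =>
    intro n
    obtain ⟨k, v⟩ := p
    rw [List.zipIdx_cons, pvQuals_cons]
    by_cases hg : 20 < PySem.Str.len v
    · rw [if_pos hg]
      unfold pvScanItems
      rw [if_pos hg]
      rfl
    · rw [if_neg hg]
      unfold pvScanItems
      rw [if_neg hg]
      exact ih (n + 1)

-- the first key found by find? has minimal rank among matching keys of a
-- nodup-keyed, rank-increasing assoc list
theorem pv_rank_min_gen (cs : List (String × Nat)) (p : String → Bool)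
    (hnd : (cs.map Prod.fst).Nodup) (hp : cs.Pairwise (fun a b => a.2 < b.2)) :
    ∀ {n : String} {rn : Nat},
      (cs.map Prod.fst).find? p = some n → cs.lookup n = some rn →
      ∀ k rk, cs.lookup k = some rk → p k = true → rn < rk ∨ k = n := by
  induction cs with
  | nil => intro n rn hf; simp at hf
  | cons c t ih =>
    obtain ⟨a, ra⟩ := c
    intro n rn hf hrn k rk hk hpk
    simp only [List.map_cons, List.nodup_cons] at hnd
    rw [List.pairwise_cons] at hp
    by_cases hpa : p a = true
    · rw [List.map_cons, List.find?_cons_of_pos hpa] at hf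
      injection hf with hf
      subst hf
      obtain rfl : ra = rn := by simpa [List.lookup] using hrn
      by_cases hka : k = a
      · exact Or.inr hka
      · have hke : (k == a) = false := by simp [hka]
        simp only [List.lookup, hke] at hk
        exact Or.inl (hp.1 _ (pv_lookup_mem hk))
    · rw [List.map_cons, List.find?_cons_of_neg (by simpa using hpa)] at hf
      have hnt : n ∈ t.map Prod.fst := List.mem_of_find?_eq_some hf
      have hna : n ≠ a := by rintro rfl; exact hnd.1 hnt
      have hne : (n == a) = false := by simp [hna]
      simp only [List.lookup, hne] at hrn
      have hka : k ≠ a := by rintro rfl; rw [hpk] at hpa; exact hpa rfl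
      have hke : (k == a) = false := by simp [hka]
      simp only [List.lookup, hke] at hk
      exact ih hnd.2 hp.2 hf hrn k rk hk hpk

-- every rank in the rank dict is below the number of candidates
theorem pv_rank_lt (y : String × Nat) (hy : y ∈ pvRankDict) : y.2 < pvCandList.length := by
  fin_cases hy <;> simp [pvCandList]

-- the rank dict's keys are exactly the candidate list, nodup, with increasing ranks
theorem pv_rankDict_keys : pvRankDict.map Prod.fst = pvCandList := by rfl
theorem pv_rankDict_nodup : (pvRankDict.map Prod.fst).Nodup := by decide
theorem pv_rankDict_incr : pvRankDict.Pairwise (fun a b => a.2 < b.2) := by decide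

-- qualifying pairs of an all-non-candidate item list have strictly increasing ranks
theorem pv_quals_incr (l : List (String × String))
    (h : ∀ x ∈ l, 20 < PySem.Str.len x.2 → pvRankDict.lookup x.1 = none) :
    ∀ n, (pvQuals (l.zipIdx n)).Pairwise (fun a b => a.1 < b.1) ∧
      ∀ y ∈ pvQuals (l.zipIdx n), pvCandList.length + n ≤ y.1 := by
  induction l with
  | nil => intro n; simp [pvQuals, List.zipIdx]
  | cons x t ih =>
    intro n
    have ih' := ih (fun y hy => h y (List.mem_cons_of_mem _ hy)) (n + 1)
    rw [List.zipIdx_cons, pvQuals_cons]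
    by_cases hg : 20 < PySem.Str.len x.2
    · rw [if_pos hg]
      have hr : pvRankOf x.1 n = pvCandList.length + n := by
        unfold pvRankOf
        rw [h x (by simp) hg]
        rfl
      constructor
      · rw [List.pairwise_cons]
        refine ⟨fun y hy => ?_, ih'.1⟩
        have := ih'.2 y hy
        simp only [hr]
        omega
      · intro y hy
        rcases List.mem_cons.mp hy with rfl | hy
        · simp [hr]
        · have := ih'.2 y hy; omega
    · rw [if_neg hg]
      exact ⟨ih'.1, fun y hy => by have := ih'.2 y hy; omega⟩

-- ===== VERDICT (by name: the statement is the Claim_ definition above) =====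
theorem find_text_field_spec : Claim_equal_find_text_field := by
  intro sample _ hpre
  unfold Spec_find_text_field find_text_field find_text_field_alt
  rw [pvFindCand_eq, pv_foldl_step_eq]
  cases hc : pvCandidates.find? (pvGood sample) with
  | some n =>
    -- a candidate qualifies: B's min-fold picks exactly that candidate
    have hcl : pvCandList.find? (pvGood sample) = some n := hc
    have hgn : pvGood sample n = true := List.find?_some hcl
    have hnmem : n ∈ pvCandList := List.mem_of_find?_eq_some hcl
    obtain ⟨rn, hrn⟩ := pv_lookup_isSome (l := pvRankDict) (by rw [pv_rankDict_keys]; exact hnmem)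
    have hrn7 : rn < pvCandList.length := pv_rank_lt (n, rn) (pv_lookup_mem hrn)
    obtain ⟨v, hlk, hv⟩ := (pvGood_iff sample n).mp hgn
    obtain ⟨i, hmemz⟩ := pv_mem_zipIdx_of_mem (pv_lookup_mem hlk) 0
    have hx : ((rn, n) : Nat × String) ∈ pvQuals (sample.zipIdx 0) := by
      unfold pvQuals
      refine List.mem_filterMap.mpr ⟨((n, v), i), hmemz, ?_⟩
      rw [if_pos hv]
      unfold pvRankOf
      rw [hrn]
      rfl
    have hmin : ∀ y ∈ pvQuals (sample.zipIdx 0), (rn, n).1 < y.1 ∨ y = (rn, n) := by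
      intro y hy
      unfold pvQuals at hy
      obtain ⟨⟨⟨k, v'⟩, j⟩, hjz, hfy⟩ := List.mem_filterMap.mp hy
      by_cases hg : 20 < PySem.Str.len v'
      · rw [if_pos hg] at hfy
        injection hfy with hfy
        subst hfy
        have hkv : (k, v') ∈ sample := pv_mem_of_mem_zipIdx hjz
        have hgk : pvGood sample k = true :=
          (pvGood_iff sample k).mpr ⟨v', pv_mem_lookup hkv hpre, hg⟩
        cases hk : pvRankDict.lookup k with
        | some rk =>
          have hrky : pvRankOf k j = rk := by unfold pvRankOf; rw [hk]; rfl
          rcases pv_rank_min_gen pvRankDict (pvGood sample) pv_rankDict_nodup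
              pv_rankDict_incr (pv_rankDict_keys ▸ hcl) hrn k rk hk hgk with hlt | hkn
          · left; simpa [hrky] using hlt
          · right
            subst hkn
            rw [hrn] at hk
            injection hk with hk
            rw [hrky, hk]
        | none =>
          left
          have hrky : pvRankOf k j = pvCandList.length + j := by
            unfold pvRankOf; rw [hk]; rfl
          simp only [hrky]
          omega
      · rw [if_neg hg] at hfy
        exact absurd hfy (by simp)
    rw [pv_min_result (pvQuals (sample.zipIdx 0)) (rn, n) hx hmin none (Or.inl rfl)]
    rfl
  | none =>
    -- no candidate qualifies: every qualifying key is a non-candidate, ranks increase,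
    -- so B's min-fold returns the first qualifying item, exactly A's second loop
    have hnone : ∀ c ∈ pvCandidates, pvGood sample c = false := by
      intro c hcmem
      cases h : pvGood sample c
      · rfl
      · exact absurd h (List.find?_eq_none.mp hc c hcmem)
    have hnc : ∀ x ∈ sample, 20 < PySem.Str.len x.2 → pvRankDict.lookup x.1 = none := by
      intro x hx hg
      obtain ⟨k, v⟩ := x
      have hgk : pvGood sample k = true :=
        (pvGood_iff sample k).mpr ⟨v, pv_mem_lookup hx hpre, hg⟩
      cases hk : pvRankDict.lookup k with
      | none => rfl
      | some rk =>
        have hkmem : k ∈ pvCandList := by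
          rw [← pv_rankDict_keys]
          exact List.mem_map.mpr ⟨(k, rk), pv_lookup_mem hk, rfl⟩
        rw [hnone k hkmem] at hgk
        exact absurd hgk (by simp)
    rw [pv_min_head _ ((pv_quals_incr sample hnc 0).1)]
    exact pvScanItems_eq_head sample 0
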